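-- pv_equiv track=rewrite | github.com/dmackinnon1/portia | build/portia.py | whichDistinct
-- ===== SOURCE A (Python) =====
-- def whichDistinct(truthSequence):
--     distinct = []
--     position = 0
--     for i in truthSequence:
--         position += 1
--         current = i
--         count = 0
--         for j in truthSequence:
--             if i == j:
--                 count +=1
--         if count == 1 :
--             distinct.append(position)
--     return distinct
-- ===== SOURCE B (Python) =====
-- def whichDistinct(truthSequence):
--     counts = {}
--     for x in truthSequence:
--         counts[x] = counts.get(x, 0) + 1
--     return [pos for pos, x in enumerate(truthSequence, 1) if counts.get(x, 0) == 1]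
-- ===== Notes on version B (the rewrite author's own statement) =====
-- stated objective: faster
-- what changed: Replaces the nested counting scan (recounting the whole list for every element) by a single dict-of-counts pass followed by one emission pass over enumerate.
import Mathlib
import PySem

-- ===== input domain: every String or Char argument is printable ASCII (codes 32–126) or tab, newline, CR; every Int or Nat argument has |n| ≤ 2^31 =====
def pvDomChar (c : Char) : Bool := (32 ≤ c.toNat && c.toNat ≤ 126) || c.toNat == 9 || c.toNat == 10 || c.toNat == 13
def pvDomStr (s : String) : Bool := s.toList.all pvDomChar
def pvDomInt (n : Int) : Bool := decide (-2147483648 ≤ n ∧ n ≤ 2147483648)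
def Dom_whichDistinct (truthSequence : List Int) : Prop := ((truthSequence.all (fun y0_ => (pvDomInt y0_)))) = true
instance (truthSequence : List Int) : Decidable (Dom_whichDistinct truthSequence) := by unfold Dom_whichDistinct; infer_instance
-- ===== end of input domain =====

-- B replaces A's nested O(n^2) recount of the whole list for every element by one
-- dict-of-counts pass and one emission pass (objective: faster, asymptotic).

-- ===== PORT A =====
-- inner loop: 'count = 0; for j in truthSequence: if i == j: count += 1'
def pvCountA (truthSequence : List Int) (i : Int) : Int :=
  truthSequence.foldl (fun count j => if i == j then count + 1 else count) 0

def whichDistinct (truthSequence : List Int) : List Int :=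
  (truthSequence.foldl
      (fun (st : List Int × Int) i =>
        let position := st.2 + 1
        if pvCountA truthSequence i == 1 then (st.1 ++ [position], position)
        else (st.1, position))
      ([], 0)).1

-- ===== PORT B =====
-- '[pos for pos, x in enumerate(truthSequence, 1) if counts.get(x, 0) == 1]'
def pvEmitB (counts : PySem.Dict Int Int) : List Int → Int → List Int
  | [], _ => []
  | x :: xs, pos =>
    if counts.getD x 0 == 1 then pos :: pvEmitB counts xs (pos + 1)
    else pvEmitB counts xs (pos + 1)

def whichDistinct_alt (truthSequence : List Int) : List Int :=
  let counts := truthSequence.foldl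
      (fun (d : PySem.Dict Int Int) x => d.insert x (d.getD x 0 + 1)) PySem.Dict.empty
  pvEmitB counts truthSequence 1

-- ===== PRECONDITION & SPEC =====
def Spec_whichDistinct (truthSequence : List Int) (out : List Int) : Prop := out = whichDistinct_alt truthSequence
instance (truthSequence : List Int) (out : List Int) : Decidable (Spec_whichDistinct truthSequence out) := by unfold Spec_whichDistinct; infer_instance

-- ===== CLAIM (what is proved, stated in full; the proofs are below) =====
def Claim_equal_whichDistinct : Prop := ∀ (truthSequence : List Int), Dom_whichDistinct truthSequence → Spec_whichDistinct truthSequence (whichDistinct truthSequence)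

-- ===== LEMMAS AND PROOFS =====

theorem pv_countA_eq (ts : List Int) (i : Int) : pvCountA ts i = (ts.count i : Int) := by
  unfold pvCountA
  suffices h : ∀ (l : List Int) (c : Int),
      l.foldl (fun count j => if i == j then count + 1 else count) c = c + (l.count i : Int) by
    simpa using h ts 0
  intro l
  induction l with
  | nil => intro c; simp
  | cons x xs ih =>
    intro c
    rw [List.foldl_cons, ih, List.count_cons]
    by_cases hx : i = x <;> simp [hx] <;> omega

theorem pv_countsB_eq (ts : List Int) (v : Int) :
    (ts.foldl (fun (d : PySem.Dict Int Int) x => d.insert x (d.getD x 0 + 1))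
        PySem.Dict.empty).getD v 0 = (ts.count v : Int) := by
  rw [PySem.Dict.foldl_insert_getD_add_one_eq_counter, PySem.Dict.getD_counter]

theorem pv_loop_eq (ts : List Int) (counts : PySem.Dict Int Int)
    (hcond : ∀ x, (pvCountA ts x == 1) = (counts.getD x 0 == 1)) :
    ∀ (l : List Int) (acc : List Int) (p : Int),
      (l.foldl
        (fun (st : List Int × Int) i =>
          let position := st.2 + 1
          if pvCountA ts i == 1 then (st.1 ++ [position], position)
          else (st.1, position))
        (acc, p)).1 = acc ++ pvEmitB counts l (p + 1) := by
  intro l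
  induction l with
  | nil => intro acc p; simp [pvEmitB]
  | cons x xs ih =>
    intro acc p
    rw [List.foldl_cons]
    cases hc : (counts.getD x 0 == 1) with
    | true =>
      have hA : (pvCountA ts x == 1) = true := (hcond x).trans hc
      simp only [hA, if_true, pvEmitB, hc, ih]
      simp
    | false =>
      have hA : (pvCountA ts x == 1) = false := (hcond x).trans hc
      simp only [hA, Bool.false_eq_true, if_false, pvEmitB, hc, ih]

-- ===== VERDICT (by name: the statement is the Claim_ definition above) =====
theorem whichDistinct_spec : Claim_equal_whichDistinct := by
  intro ts _
  unfold Spec_whichDistinct whichDistinct whichDistinct_alt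
  rw [pv_loop_eq ts _ (fun x => by rw [pv_countA_eq, pv_countsB_eq])]
  simp
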